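-- pv_equiv track=rewrite | github.com/liip/ckanext-switzerland | ckanext/switzerland/validators.py | _get_publisher_from_form
-- ===== SOURCE A (Python) =====
-- def _get_publisher_from_form(extras):
--     if isinstance(extras, dict):
--         publisher_fields = [
--             (key, value.strip())
--             for key, value in list(extras.items())
--             if key.startswith("publisher-")
--             if value.strip() != ""
--         ]
--         if not publisher_fields:
--             return None
--         else:
--             publisher = {"url": "", "name": ""}
--             publisher_url = [
--                 field[1] for field in publisher_fields if field[0] == "publisher-url"
--             ]
--             if publisher_url:
--                 publisher["url"] = publisher_url[0]
--             publisher_name = [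
--                 field[1] for field in publisher_fields if field[0] == "publisher-name"
--             ]
--             if publisher_name:
--                 publisher["name"] = publisher_name[0]
--             return publisher
--     return None
-- ===== SOURCE B (Python) =====
-- def _get_publisher_from_form(extras):
--     if not isinstance(extras, dict):
--         return None
--     url = ""
--     name = ""
--     found = False
--     for key, value in extras.items():
--         if key.startswith("publisher-"):
--             v = value.strip()
--             if v != "":
--                 found = True
--                 if key == "publisher-url" and url == "":
--                     url = v
--                 elif key == "publisher-name" and name == "":
--                     name = v
--     if found:
--         return {"url": url, "name": name}
--     return None
-- ===== Notes on version B (the rewrite author's own statement) =====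
-- stated objective: simpler
-- what changed: B replaces A's intermediate publisher_fields list and its two extra filtering scans by a single accumulator loop over extras that tracks url, name and a found flag directly.
import Mathlib
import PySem

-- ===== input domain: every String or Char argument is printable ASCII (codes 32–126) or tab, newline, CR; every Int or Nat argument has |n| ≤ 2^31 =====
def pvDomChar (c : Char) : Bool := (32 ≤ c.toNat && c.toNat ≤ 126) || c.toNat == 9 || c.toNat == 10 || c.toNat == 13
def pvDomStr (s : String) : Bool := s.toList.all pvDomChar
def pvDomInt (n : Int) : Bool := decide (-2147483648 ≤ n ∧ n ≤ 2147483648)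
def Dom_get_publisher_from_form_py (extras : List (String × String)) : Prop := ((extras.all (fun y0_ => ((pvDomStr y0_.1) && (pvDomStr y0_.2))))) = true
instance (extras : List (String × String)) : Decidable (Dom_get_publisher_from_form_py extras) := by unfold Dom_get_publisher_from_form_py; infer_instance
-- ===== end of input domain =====

-- B replaces A's intermediate publisher_fields list and two extra filtering scans by a
-- single accumulator loop over extras (objective: simpler).


-- ===== PORT A =====
def get_publisher_from_form_py (extras : List (String × String)) : Option (List (String × String)) :=
  -- isinstance(extras, dict) is always true under the type convention
  let publisher_fields := extras.filterMap (fun kv =>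
    if PySem.Str.startswith kv.1 "publisher-" = true ∧ PySem.Str.strip kv.2 ≠ "" then
      some (kv.1, PySem.Str.strip kv.2)
    else none)
  if publisher_fields = [] then
    none
  else
    let publisher_url := publisher_fields.filterMap (fun f =>
      if f.1 = "publisher-url" then some f.2 else none)
    let url := match publisher_url with | [] => "" | x :: _ => x
    let publisher_name := publisher_fields.filterMap (fun f =>
      if f.1 = "publisher-name" then some f.2 else none)
    let name := match publisher_name with | [] => "" | x :: _ => x
    some [("url", url), ("name", name)]

-- ===== PORT B =====
-- the for-loop of B: state (url, name, found)
def pubAltLoop (extras : List (String × String)) (url name : String) (found : Bool) :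
    String × String × Bool :=
  match extras with
  | [] => (url, name, found)
  | (k, v) :: rest =>
    if PySem.Str.startswith k "publisher-" = true then
      let s := PySem.Str.strip v
      if s ≠ "" then
        if k = "publisher-url" ∧ url = "" then pubAltLoop rest s name true
        else if k = "publisher-name" ∧ name = "" then pubAltLoop rest url s true
        else pubAltLoop rest url name true
      else pubAltLoop rest url name found
    else pubAltLoop rest url name found

def get_publisher_from_form_py_alt (extras : List (String × String)) :
    Option (List (String × String)) :=
  match pubAltLoop extras "" "" false with
  | (url, name, found) =>
    if found then some [("url", url), ("name", name)] else none

-- ===== PRECONDITION & SPEC =====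
def Spec_get_publisher_from_form_py (extras : List (String × String)) (out : Option (List (String × String))) : Prop := out = get_publisher_from_form_py_alt extras
instance (extras : List (String × String)) (out : Option (List (String × String))) : Decidable (Spec_get_publisher_from_form_py extras out) := by unfold Spec_get_publisher_from_form_py; infer_instance

-- ===== CLAIM (what is proved, stated in full; the proofs are below) =====
def Claim_equal_get_publisher_from_form_py : Prop := ∀ (extras : List (String × String)), Dom_get_publisher_from_form_py extras → Spec_get_publisher_from_form_py extras (get_publisher_from_form_py extras)

-- ===== LEMMAS AND PROOFS =====

-- A's publisher_fields list
def pubFields (extras : List (String × String)) : List (String × String) :=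
  extras.filterMap (fun kv =>
    if PySem.Str.startswith kv.1 "publisher-" = true ∧ PySem.Str.strip kv.2 ≠ "" then
      some (kv.1, PySem.Str.strip kv.2)
    else none)

-- first value for a given key in publisher_fields, default ""
def firstVal (key : String) (l : List (String × String)) : String :=
  (l.filterMap (fun f => if f.1 = key then some f.2 else none)).headD ""

theorem firstVal_cons_self (key s : String) (l : List (String × String)) :
    firstVal key ((key, s) :: l) = s := by
  simp [firstVal]

theorem firstVal_cons_ne (key k s : String) (l : List (String × String)) (h : ¬ k = key) :
    firstVal key ((k, s) :: l) = firstVal key l := by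
  simp [firstVal, h]

theorem pubAltLoop_cons (k v : String) (rest : List (String × String)) (u n : String)
    (f : Bool) :
    pubAltLoop ((k, v) :: rest) u n f =
      if PySem.Str.startswith k "publisher-" = true then
        (if PySem.Str.strip v ≠ "" then
          (if k = "publisher-url" ∧ u = "" then pubAltLoop rest (PySem.Str.strip v) n true
           else if k = "publisher-name" ∧ n = "" then pubAltLoop rest u (PySem.Str.strip v) true
           else pubAltLoop rest u n true)
         else pubAltLoop rest u n f)
      else pubAltLoop rest u n f := rfl

theorem pubAltLoop_inv (extras : List (String × String)) :
    ∀ (u n : String) (f : Bool),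
      pubAltLoop extras u n f =
        ((if u = "" then firstVal "publisher-url" (pubFields extras) else u),
         (if n = "" then firstVal "publisher-name" (pubFields extras) else n),
         (f || decide (pubFields extras ≠ []))) := by
  induction extras with
  | nil =>
    intro u n f
    simp [pubAltLoop, pubFields, firstVal]
  | cons kv rest ih =>
    intro u n f
    obtain ⟨k, v⟩ := kv
    by_cases hs : PySem.Str.startswith k "publisher-" = true
    · by_cases he : PySem.Str.strip v ≠ ""
      · have hpf : pubFields ((k, v) :: rest) = (k, PySem.Str.strip v) :: pubFields rest := by
          unfold pubFields
          rw [List.filterMap_cons]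
          simp only [if_pos (And.intro hs he)]
        by_cases h1 : k = "publisher-url" ∧ u = ""
        · have hstep : pubAltLoop ((k, v) :: rest) u n f
              = pubAltLoop rest (PySem.Str.strip v) n true := by
            rw [pubAltLoop_cons, if_pos hs, if_pos he, if_pos h1]
          obtain ⟨hk, hu⟩ := h1
          subst hk hu
          rw [hstep, ih, hpf]
          rw [firstVal_cons_self]
          rw [firstVal_cons_ne _ _ _ _ (by decide)]
          simp [he]
        · by_cases h2 : k = "publisher-name" ∧ n = ""
          · have hstep : pubAltLoop ((k, v) :: rest) u n f
                = pubAltLoop rest u (PySem.Str.strip v) true := by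
              rw [pubAltLoop_cons, if_pos hs, if_pos he, if_neg h1, if_pos h2]
            obtain ⟨hk, hn⟩ := h2
            subst hk hn
            rw [hstep, ih, hpf]
            rw [firstVal_cons_self]
            rw [firstVal_cons_ne _ _ _ _ (by decide)]
            simp [he]
          · have hstep : pubAltLoop ((k, v) :: rest) u n f = pubAltLoop rest u n true := by
              rw [pubAltLoop_cons, if_pos hs, if_pos he, if_neg h1, if_neg h2]
            rw [hstep, ih, hpf]
            refine Prod.ext ?_ (Prod.ext ?_ ?_)
            · by_cases hku : k = "publisher-url"
              · have hu : ¬ u = "" := fun hu => h1 ⟨hku, hu⟩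
                simp [hu]
              · rw [firstVal_cons_ne _ _ _ _ hku]
            · by_cases hkn : k = "publisher-name"
              · have hn : ¬ n = "" := fun hn => h2 ⟨hkn, hn⟩
                simp [hn]
              · rw [firstVal_cons_ne _ _ _ _ hkn]
            · simp
      · have hpf : pubFields ((k, v) :: rest) = pubFields rest := by
          unfold pubFields
          rw [List.filterMap_cons]
          simp only [if_neg (fun h : _ ∧ _ => he h.2)]
        have hstep : pubAltLoop ((k, v) :: rest) u n f = pubAltLoop rest u n f := by
          rw [pubAltLoop_cons, if_pos hs, if_neg he]
        rw [hstep, ih, hpf]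
    · have hpf : pubFields ((k, v) :: rest) = pubFields rest := by
        unfold pubFields
        rw [List.filterMap_cons]
        simp only [if_neg (fun h : _ ∧ _ => hs h.1)]
      have hstep : pubAltLoop ((k, v) :: rest) u n f = pubAltLoop rest u n f := by
        rw [pubAltLoop_cons, if_neg hs]
      rw [hstep, ih, hpf]

theorem headD_eq_match (l : List String) :
    l.headD "" = (match l with | [] => "" | x :: _ => x) := by
  cases l <;> rfl

-- ===== VERDICT (by name: the statement is the Claim_ definition above) =====
theorem get_publisher_from_form_py_spec : Claim_equal_get_publisher_from_form_py := by
  intro extras _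
  unfold Spec_get_publisher_from_form_py
  show get_publisher_from_form_py extras = get_publisher_from_form_py_alt extras
  unfold get_publisher_from_form_py get_publisher_from_form_py_alt
  rw [pubAltLoop_inv]
  by_cases hpf : pubFields extras = []
  · unfold pubFields at hpf
    rw [if_pos hpf]
    unfold pubFields
    rw [hpf]
    rfl
  · have hpf' := hpf
    unfold pubFields at hpf'
    rw [if_neg hpf']
    have : (decide (pubFields extras ≠ [])) = true := by
      simp [hpf]
    rw [this]
    unfold pubFields firstVal
    rw [headD_eq_match, headD_eq_match]
    rfl
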